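-- pv_equiv track=rewrite | github.com/frank-lyy/paperclip | statistics_calculator.py | _calculate_best_streak
-- ===== SOURCE A (Python) =====
-- from typing import Dict, Any
--
-- def _calculate_best_streak(records: Dict) -> int:
--     dates = sorted(records.keys())
--     best_streak = 0
--     temp_streak = 0
--
--     for date in dates:
--         if records[date]['completed'] >= records[date]['goal']:
--             temp_streak += 1
--             best_streak = max(best_streak, temp_streak)
--         else:
--             temp_streak = 0
--
--     return best_streak
-- ===== SOURCE B (Python) =====
-- def _calculate_best_streak(records):
--     flags = [records[d]['completed'] >= records[d]['goal'] for d in sorted(records.keys())]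
--     n = len(flags)
--     best = 0
--     i = 0
--     while i < n:
--         j = i
--         while j < n and flags[j]:
--             j += 1
--         best = max(best, j - i)
--         i = j + 1
--     return best
-- ===== Notes on version B (the rewrite author's own statement) =====
-- stated objective: alternative
-- what changed: B maps the sorted dates to a goal-met flag list once, then consumes that list run by run with a two-pointer scan (advance j over each maximal streak, take max of run lengths j-i), instead of A's per-day temp_streak/best_streak accumulator state machine.
import Mathlib
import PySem

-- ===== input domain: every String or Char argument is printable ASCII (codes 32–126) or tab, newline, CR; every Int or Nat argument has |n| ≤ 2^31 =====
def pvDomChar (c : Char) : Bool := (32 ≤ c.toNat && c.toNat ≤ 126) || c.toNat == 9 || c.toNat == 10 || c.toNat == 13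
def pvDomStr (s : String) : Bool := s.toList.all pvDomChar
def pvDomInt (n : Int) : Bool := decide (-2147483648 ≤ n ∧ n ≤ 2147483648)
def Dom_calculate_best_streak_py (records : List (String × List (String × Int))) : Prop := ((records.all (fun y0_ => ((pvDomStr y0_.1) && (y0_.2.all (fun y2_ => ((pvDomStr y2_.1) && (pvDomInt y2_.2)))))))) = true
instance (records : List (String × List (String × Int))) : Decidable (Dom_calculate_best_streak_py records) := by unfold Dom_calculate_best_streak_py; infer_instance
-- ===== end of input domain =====

-- B replaces A's per-day temp/best accumulator with a flag list consumed run by run (two-pointer scan); alternative decomposition, same cost.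


-- ===== PORT A =====
-- records[date][key]: the two Python dict lookups (Pre_ guarantees the inner keys exist; the outer date always comes from records.keys())
def pvEntry (records : List (String × List (String × Int))) (date key : String) : Int :=
  PySem.Dict.getD (PySem.Dict.mk (PySem.Dict.getD (PySem.Dict.mk records) date [])) key 0

def calculate_best_streak_py (records : List (String × List (String × Int))) : Int :=
  let dates := PySem.List.sorted (PySem.Dict.keys (PySem.Dict.mk records)) (fun x => x) false
  (dates.foldl (fun (s : Int × Int) date =>
      if pvEntry records date "goal" ≤ pvEntry records date "completed" then
        (max s.1 (s.2 + 1), s.2 + 1)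
      else
        (s.1, 0)) ((0 : Int), (0 : Int))).1

-- ===== PORT B =====
-- inner loop of B: 'while j < n and flags[j]: j += 1' (fuel-totalized; fuel ≥ n - j on every call)
def scanJ (flags : List Bool) (n : Int) : Nat → Int → Int
  | 0, j => j
  | fuel + 1, j =>
    if j < n ∧ ((PySem.List.pyGet? flags j).getD false) = true then
      scanJ flags n fuel (j + 1)
    else j

-- outer loop of B: 'while i < n: …' (fuel-totalized; i grows by ≥ 1 per iteration)
def outerLoop (flags : List Bool) (n : Int) : Nat → Int → Int → Int
  | 0, best, _ => best
  | fuel + 1, best, i =>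
    if i < n then
      outerLoop flags n fuel (max best (scanJ flags n (fuel + 1) i - i)) (scanJ flags n (fuel + 1) i + 1)
    else best

def calculate_best_streak_py_alt (records : List (String × List (String × Int))) : Int :=
  let dates := PySem.List.sorted (PySem.Dict.keys (PySem.Dict.mk records)) (fun x => x) false
  let flags := dates.map (fun date =>
      decide (pvEntry records date "goal" ≤ pvEntry records date "completed"))
  outerLoop flags (flags.length : Int) (flags.length + 1) 0 0

-- ===== PRECONDITION & SPEC =====
-- Pre_ excludes records with an inner dict lacking a 'completed' or 'goal' key: Python A raises KeyError there.
def Pre_calculate_best_streak_py (records : List (String × List (String × Int))) : Prop :=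
  records.all (fun p => p.2.any (fun q => q.1 == "completed") && p.2.any (fun q => q.1 == "goal")) = true
instance (records : List (String × List (String × Int))) : Decidable (Pre_calculate_best_streak_py records) := by unfold Pre_calculate_best_streak_py; infer_instance

def pvWitness_calculate_best_streak_py : (List (String × List (String × Int))) :=
  [("2024-01-01", [("completed", 5), ("goal", 3)]), ("2024-01-02", [("completed", 1), ("goal", 3)])]

def Spec_calculate_best_streak_py (records : List (String × List (String × Int))) (out : Int) : Prop := out = calculate_best_streak_py_alt records
instance (records : List (String × List (String × Int))) (out : Int) : Decidable (Spec_calculate_best_streak_py records out) := by unfold Spec_calculate_best_streak_py; infer_instance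

-- ===== CLAIM (what is proved, stated in full; the proofs are below) =====
def Claim_equal_calculate_best_streak_py : Prop := ∀ (records : List (String × List (String × Int))), Dom_calculate_best_streak_py records → Pre_calculate_best_streak_py records → Spec_calculate_best_streak_py records (calculate_best_streak_py records)

-- ===== LEMMAS AND PROOFS =====

-- number of leading True flags
def leadCnt : List Bool → Nat
  | [] => 0
  | false :: _ => 0
  | true :: t => leadCnt t + 1

-- best streak, consuming the list run by run (the common shape both ports are reduced to)
def runMax : List Bool → Int → Int
  | [], best => best
  | b :: t, best => runMax ((b :: t).drop (leadCnt (b :: t) + 1)) (max best (leadCnt (b :: t) : Int))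
termination_by fs _ => fs.length
decreasing_by simp

theorem runMax_step (t : List Bool) (best : Int) (h : 0 ≤ best) :
    runMax t best = runMax (t.drop (leadCnt t + 1)) (max best (leadCnt t : Int)) := by
  cases t with
  | nil =>
    simp only [List.drop_nil, leadCnt, Nat.cast_zero]
    rw [runMax.eq_1, runMax.eq_1]
    omega
  | cons b t => rw [runMax.eq_2]

theorem foldA_runMax (fs : List Bool) (best temp : Int) (h0 : 0 ≤ temp) (h1 : temp ≤ best) :
    (fs.foldl (fun (s : Int × Int) b => if b then (max s.1 (s.2 + 1), s.2 + 1) else (s.1, 0)) (best, temp)).1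
      = runMax (fs.drop (leadCnt fs + 1)) (max best (temp + (leadCnt fs : Int))) := by
  induction fs generalizing best temp with
  | nil =>
    simp only [List.foldl_nil, List.drop_nil, leadCnt, Nat.cast_zero, add_zero]
    rw [runMax.eq_1]
    omega
  | cons b t ih =>
    cases b with
    | true =>
      rw [List.foldl_cons, if_pos rfl]
      rw [ih (max best (temp + 1)) (temp + 1) (by omega) (by omega)]
      simp only [leadCnt, List.drop_succ_cons]
      congr 1
      push_cast
      omega
    | false =>
      rw [List.foldl_cons, if_neg (by simp)]
      rw [ih best 0 le_rfl (by omega)]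
      simp only [leadCnt, List.drop_succ_cons, List.drop_zero, Nat.cast_zero, add_zero, zero_add]
      rw [max_eq_left h1, runMax_step t best (by omega)]

theorem scanJ_spec (flags : List Bool) :
    ∀ (fuel : Nat) (i : Int), 0 ≤ i → flags.length ≤ i.toNat + fuel →
      scanJ flags (flags.length : Int) fuel i = i + (leadCnt (flags.drop i.toNat) : Int) := by
  intro fuel
  induction fuel with
  | zero =>
    intro i h0 hk
    rw [List.drop_eq_nil_of_le (by omega)]
    simp [scanJ, leadCnt]
  | succ fuel ih =>
    intro i h0 hk
    by_cases hi : i < (flags.length : Int)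
    · have hlt : i.toNat < flags.length := by omega
      have hd : flags.drop i.toNat = flags[i.toNat] :: flags.drop (i.toNat + 1) :=
        List.drop_eq_getElem_cons hlt
      have hget : (PySem.List.pyGet? flags i).getD false = flags[i.toNat] := by
        have hcast : i = ((i.toNat : Nat) : Int) := by omega
        conv_lhs => rw [hcast]
        rw [PySem.List.pyGet?_natCast, List.getElem?_eq_getElem hlt]
        rfl
      cases hb : flags[i.toNat] with
      | true =>
        rw [scanJ, if_pos ⟨hi, by rw [hget, hb]⟩]
        rw [ih (i + 1) (by omega) (by omega)]
        have : (i + 1).toNat = i.toNat + 1 := by omega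
        rw [this, hd, hb]
        simp only [leadCnt]
        push_cast
        ring
      | false =>
        rw [scanJ, if_neg (by rw [hget, hb]; simp)]
        rw [hd, hb]
        simp [leadCnt]
    · rw [scanJ, if_neg (by omega)]
      rw [List.drop_eq_nil_of_le (by omega)]
      simp [leadCnt]

theorem outer_spec (flags : List Bool) :
    ∀ (fuel : Nat) (i best : Int), 0 ≤ i → 0 ≤ best → flags.length ≤ i.toNat + fuel →
      outerLoop flags (flags.length : Int) fuel best i = runMax (flags.drop i.toNat) best := by
  intro fuel
  induction fuel with
  | zero =>
    intro i best h0 hb hk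
    rw [List.drop_eq_nil_of_le (by omega)]
    rw [runMax.eq_1]
    rfl
  | succ fuel ih =>
    intro i best h0 hb hk
    by_cases hi : i < (flags.length : Int)
    · rw [outerLoop, if_pos hi]
      rw [scanJ_spec flags (fuel + 1) i h0 (by omega)]
      set c := leadCnt (flags.drop i.toNat) with hc
      have hcb : flags.drop i.toNat ≠ [] := by
        intro h
        have := List.drop_eq_nil_iff.mp h
        omega
      rw [show i + (c : Int) - i = (c : Int) by ring]
      rw [ih (i + (c : Int) + 1) (max best (c : Int)) (by omega) (by omega) (by omega)]
      have hdn : (i + (c : Int) + 1).toNat = i.toNat + (c + 1) := by omega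
      rw [hdn, ← List.drop_drop]
      exact (runMax_step (List.drop i.toNat flags) best hb).symm
    · rw [outerLoop, if_neg (by omega)]
      rw [List.drop_eq_nil_of_le (by omega), runMax.eq_1]

-- ===== VERDICT (by name: the statement is the Claim_ definition above) =====
theorem calculate_best_streak_py_spec : Claim_equal_calculate_best_streak_py := by
  intro records _ _
  show calculate_best_streak_py records = calculate_best_streak_py_alt records
  simp only [calculate_best_streak_py, calculate_best_streak_py_alt]
  set dates := PySem.List.sorted (PySem.Dict.keys (PySem.Dict.mk records)) (fun x => x) false with hdates
  set flags := dates.map (fun date =>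
      decide (pvEntry records date "goal" ≤ pvEntry records date "completed")) with hflags
  have hfold : (dates.foldl (fun (s : Int × Int) date =>
        if pvEntry records date "goal" ≤ pvEntry records date "completed" then
          (max s.1 (s.2 + 1), s.2 + 1)
        else (s.1, 0)) ((0 : Int), (0 : Int)))
      = flags.foldl (fun (s : Int × Int) b =>
          if b then (max s.1 (s.2 + 1), s.2 + 1) else (s.1, 0)) ((0 : Int), (0 : Int)) := by
    rw [hflags, List.foldl_map]
    simp
  rw [hfold, foldA_runMax flags 0 0 le_rfl le_rfl,
      outer_spec flags (flags.length + 1) 0 0 le_rfl le_rfl (by omega)]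
  simp only [Int.toNat_zero, List.drop_zero]
  rw [runMax_step flags 0 le_rfl]
  simp
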